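-- pv_equiv track=rewrite | github.com/muhamad-uzair/Imperfection-Tolerant-VS-designs | Injection.py | parse_shell_sections
-- ===== SOURCE A (Python) =====
-- def parse_shell_sections(lines):
--     out = []
--     cur_start, cur_header = None, None
--     for i, line in enumerate(lines):
--         if line.lstrip().startswith("*Shell Section"):
--             if cur_start is not None:
--                 out.append((cur_start, i, cur_header))
--             cur_start = i
--             cur_header = line.rstrip("\n")
--         elif line.lstrip().startswith("*") and cur_start is not None:
--             out.append((cur_start, i, cur_header))
--             cur_start, cur_header = None, None
--     if cur_start is not None:
--         out.append((cur_start, len(lines), cur_header))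
--     return out
-- ===== SOURCE B (Python) =====
-- def parse_shell_sections(lines):
--     # Two comprehension passes over an explicit marker table instead of a
--     # carried cur_start/cur_header state.
--     marks = [(i, line.lstrip().startswith("*Shell Section"), line.rstrip("\n"))
--              for i, line in enumerate(lines)
--              if line.lstrip().startswith("*")]
--     ends = [m[0] for m in marks[1:]] + [len(lines)]
--     return [(i, e, h) for (i, is_shell, h), e in zip(marks, ends) if is_shell]
-- ===== Notes on version B (the rewrite author's own statement) =====
-- stated objective: alternative
-- what changed: Replaces A's single loop with carried cur_start/cur_header state by two stateless comprehension passes: build an explicit marker table (index, is-shell flag, stripped header) for every '*'-line, then zip each marker with the next marker's index (or len(lines)) and keep the shell ones.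
import Mathlib
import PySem

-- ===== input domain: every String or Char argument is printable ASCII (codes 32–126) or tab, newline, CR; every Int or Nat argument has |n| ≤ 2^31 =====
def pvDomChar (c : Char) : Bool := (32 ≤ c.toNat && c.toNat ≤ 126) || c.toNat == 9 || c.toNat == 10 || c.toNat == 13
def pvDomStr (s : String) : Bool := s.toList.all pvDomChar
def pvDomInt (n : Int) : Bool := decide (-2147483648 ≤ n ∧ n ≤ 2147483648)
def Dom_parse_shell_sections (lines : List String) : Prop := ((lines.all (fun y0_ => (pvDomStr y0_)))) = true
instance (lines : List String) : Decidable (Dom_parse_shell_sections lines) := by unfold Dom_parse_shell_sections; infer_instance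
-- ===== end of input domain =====

-- B replaces A's carried cur_start/cur_header loop state by an explicit marker
-- table built in one comprehension pass, then zips each marker with the next
-- marker's index (objective: alternative decomposition, same cost).

-- hand port of s.rstrip("\n") (no PySem primitive for one-sided strip with chars):
-- drop the trailing '\n' characters; exact for every string
def pvRstripNL (s : String) : String :=
  String.ofList ((s.toList.reverse.dropWhile (fun c => c == '\n')).reverse)

-- ===== PORT A =====
-- the for-loop over enumerate(lines), state (out, cur_start/cur_header paired as an Option)
def pvGoA (lines : List String) (i : Int) (out : List (Int × Int × String))
    (cur : Option (Int × String)) : List (Int × Int × String) :=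
  match lines with
  | [] =>
    match cur with
    | some (s, h) => out ++ [(s, i, h)]
    | none => out
  | l :: rest =>
    if PySem.Str.startswith (PySem.Str.lstrip l) "*Shell Section" then
      pvGoA rest (i + 1)
        (match cur with
         | some (s, h) => out ++ [(s, i, h)]
         | none => out)
        (some (i, pvRstripNL l))
    else if PySem.Str.startswith (PySem.Str.lstrip l) "*" then
      match cur with
      | some (s, h) => pvGoA rest (i + 1) (out ++ [(s, i, h)]) none
      | none => pvGoA rest (i + 1) out cur
    else
      pvGoA rest (i + 1) out cur

def parse_shell_sections (lines : List String) : List (Int × Int × String) :=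
  pvGoA lines 0 [] none

-- ===== PORT B =====
def parse_shell_sections_alt (lines : List String) : List (Int × Int × String) :=
  let marks : List (Int × Bool × String) :=
    (PySem.List.enumerate lines).filterMap (fun p =>
      if PySem.Str.startswith (PySem.Str.lstrip p.2) "*" then
        some (p.1, PySem.Str.startswith (PySem.Str.lstrip p.2) "*Shell Section", pvRstripNL p.2)
      else none)
  let ends : List Int := (marks.drop 1).map (fun m => m.1) ++ [(lines.length : Int)]
  (marks.zip ends).filterMap (fun q =>
    if q.1.2.1 then some (q.1.1, q.2, q.1.2.2) else none)

-- ===== PRECONDITION & SPEC =====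
def Spec_parse_shell_sections (lines : List String) (out : List (Int × Int × String)) : Prop := out = parse_shell_sections_alt lines
instance (lines : List String) (out : List (Int × Int × String)) : Decidable (Spec_parse_shell_sections lines out) := by unfold Spec_parse_shell_sections; infer_instance

-- ===== CLAIM (what is proved, stated in full; the proofs are below) =====
def Claim_equal_parse_shell_sections : Prop := ∀ (lines : List String), Dom_parse_shell_sections lines → Spec_parse_shell_sections lines (parse_shell_sections lines)

-- ===== LEMMAS AND PROOFS =====

-- the marker table of B, built structurally from start index i
def pvMarks (i : Int) : List String → List (Int × Bool × String)
  | [] => []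
  | l :: rest =>
    if PySem.Str.startswith (PySem.Str.lstrip l) "*" then
      (i, PySem.Str.startswith (PySem.Str.lstrip l) "*Shell Section", pvRstripNL l) :: pvMarks (i + 1) rest
    else pvMarks (i + 1) rest

-- pair each shell marker with the next marker's index (or n when last)
def pvAssemble (n : Int) : List (Int × Bool × String) → List (Int × Int × String)
  | [] => []
  | (i, b, h) :: ms =>
    (if b then [(i, (match ms with | [] => n | m :: _ => m.1), h)] else []) ++ pvAssemble n ms

theorem pvMarks_eq_filterMap (lines : List String) (i : Int) :
    (PySem.List.enumerate lines i).filterMap (fun p =>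
      if PySem.Str.startswith (PySem.Str.lstrip p.2) "*" then
        some (p.1, PySem.Str.startswith (PySem.Str.lstrip p.2) "*Shell Section", pvRstripNL p.2)
      else none) = pvMarks i lines := by
  induction lines generalizing i with
  | nil => simp [PySem.List.enumerate_nil, pvMarks]
  | cons l rest ih =>
    rw [PySem.List.enumerate_cons, List.filterMap_cons]
    by_cases h : PySem.Str.startswith (PySem.Str.lstrip l) "*" = true
    · simp only [pvMarks, if_pos h, ih]
    · simp only [pvMarks, if_neg h, ih]

theorem pvAssemble_eq_zip (ms : List (Int × Bool × String)) (n : Int) :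
    (ms.zip ((ms.drop 1).map (fun m => m.1) ++ [n])).filterMap (fun q =>
      if q.1.2.1 then some (q.1.1, q.2, q.1.2.2) else none) = pvAssemble n ms := by
  induction ms with
  | nil => simp [pvAssemble]
  | cons m ms ih =>
    obtain ⟨i, b, h⟩ := m
    cases ms with
    | nil => cases b <;> simp [pvAssemble]
    | cons m' ms' =>
      simp only [List.drop_one, List.tail_cons, List.map_cons, List.cons_append,
        List.zip_cons_cons, List.filterMap_cons] at ih ⊢
      cases b <;> simp_all [pvAssemble]

theorem pvAlt_eq (lines : List String) :
    parse_shell_sections_alt lines = pvAssemble (lines.length : Int) (pvMarks 0 lines) := by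
  unfold parse_shell_sections_alt
  rw [pvMarks_eq_filterMap lines 0, pvAssemble_eq_zip]

-- a line starting (after lstrip) with "*Shell Section" starts with "*"
theorem pvShell_star (l : String)
    (h : PySem.Str.startswith (PySem.Str.lstrip l) "*Shell Section" = true) :
    PySem.Str.startswith (PySem.Str.lstrip l) "*" = true := by
  simp at h ⊢
  rw [PySem.Chars.startswith_iff] at h ⊢
  exact List.IsPrefix.trans (by decide) h

-- main invariant: A's loop from state (i, out, cur) produces out ++ the assembly
-- of the pending shell marker (if any) followed by the markers of the suffix
theorem pvGoA_eq (lines : List String) (i : Int) (out : List (Int × Int × String))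
    (cur : Option (Int × String)) :
    pvGoA lines i out cur =
      out ++ pvAssemble (i + lines.length)
        ((match cur with | none => [] | some (s, h) => [(s, true, h)]) ++ pvMarks i lines) := by
  induction lines generalizing i out cur with
  | nil =>
    cases cur with
    | none => simp [pvGoA, pvMarks, pvAssemble]
    | some sh => obtain ⟨s, h⟩ := sh; simp [pvGoA, pvMarks, pvAssemble]
  | cons l rest ih =>
    have harith : i + ((l :: rest).length : Int) = (i + 1) + (rest.length : Int) := by
      simp only [List.length_cons]; push_cast; ring
    rw [harith]
    by_cases hs : PySem.Str.startswith (PySem.Str.lstrip l) "*Shell Section" = true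
    · have hst := pvShell_star l hs
      simp at hs hst
      cases cur with
      | none => simp [pvGoA, pvMarks, pvAssemble, hs, hst, ih]
      | some sh => obtain ⟨s, h⟩ := sh; simp [pvGoA, pvMarks, pvAssemble, hs, hst, ih]
    · have hs' : PySem.Str.startswith (PySem.Str.lstrip l) "*Shell Section" = false := by
        simpa using hs
      simp at hs'
      by_cases hst : PySem.Str.startswith (PySem.Str.lstrip l) "*" = true
      · simp at hst
        cases cur with
        | none => simp [pvGoA, pvMarks, pvAssemble, hs', hst, ih]
        | some sh => obtain ⟨s, h⟩ := sh; simp [pvGoA, pvMarks, pvAssemble, hs', hst, ih]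
      · have hst' : PySem.Str.startswith (PySem.Str.lstrip l) "*" = false := by
          simpa using hst
        simp at hst'
        cases cur with
        | none => simp [pvGoA, pvMarks, hs', hst', ih]
        | some sh => obtain ⟨s, h⟩ := sh; simp [pvGoA, pvMarks, hs', hst', ih]

-- ===== VERDICT (by name: the statement is the Claim_ definition above) =====
theorem parse_shell_sections_spec : Claim_equal_parse_shell_sections := by
  intro lines _
  unfold Spec_parse_shell_sections parse_shell_sections
  rw [pvGoA_eq, pvAlt_eq]
  simp
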